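-- pv_equiv track=rewrite | github.com/AmanPandey0376/-ai-powered-learning-roadmap-generator | backend/services/roadmap_generator.py | find_similar_skill
-- ===== SOURCE A (Python) =====
-- from typing import Dict, List, Optional, Any
--
-- def find_similar_skill(skill: str, available_skills: Dict[str, Any]) -> Optional[str]:
--     """
--     Find similar skill using fuzzy matching and synonyms.
--
--     Args:
--         skill: The normalized skill to match
--         available_skills: Dictionary of available skills
--
--     Returns:
--         Matching skill name or None if no match found
--     """
--     # Define skill synonyms and variations
--     skill_synonyms = {
--         'data science': ['data scientist', 'data analytics', 'data analysis'],
--         'data scientist': ['data science', 'data analytics', 'data analysis'],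
--         'machine learning': ['ml', 'machine learning engineer', 'ai engineer'],
--         'artificial intelligence': ['ai', 'machine learning', 'ai engineer'],
--         'web development': ['web developer', 'frontend developer', 'backend developer'],
--         'full stack': ['full stack developer', 'fullstack developer', 'web developer'],
--         'react': ['react developer', 'react js', 'reactjs'],
--         'python': ['python developer', 'python programming'],
--         'javascript': ['js', 'javascript developer', 'js developer'],
--     }
--
--     # Check direct synonyms
--     for available_skill in available_skills.keys():
--         # Check if current skill is a synonym of available skill
--         if skill in skill_synonyms.get(available_skill, []):
--             return available_skill
--
--         # Check if available skill is a synonym of current skill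
--         if available_skill in skill_synonyms.get(skill, []):
--             return available_skill
--
--     # Check partial matches (contains)
--     for available_skill in available_skills.keys():
--         # Check if skill contains available skill or vice versa
--         if skill in available_skill or available_skill in skill:
--             # Prefer longer matches (more specific)
--             if len(available_skill) >= 3:  # Avoid matching very short terms
--                 return available_skill
--
--     return None
-- ===== SOURCE B (Python) =====
-- def find_similar_skill(skill, available_skills):
--     skill_synonyms = {
--         'data science': ['data scientist', 'data analytics', 'data analysis'],
--         'data scientist': ['data science', 'data analytics', 'data analysis'],
--         'machine learning': ['ml', 'machine learning engineer', 'ai engineer'],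
--         'artificial intelligence': ['ai', 'machine learning', 'ai engineer'],
--         'web development': ['web developer', 'frontend developer', 'backend developer'],
--         'full stack': ['full stack developer', 'fullstack developer', 'web developer'],
--         'react': ['react developer', 'react js', 'reactjs'],
--         'python': ['python developer', 'python programming'],
--         'javascript': ['js', 'javascript developer', 'js developer'],
--     }
--     fallback = None
--     for available_skill in available_skills.keys():
--         # synonyms take precedence over any substring match: return immediately
--         if skill in skill_synonyms.get(available_skill, []) or available_skill in skill_synonyms.get(skill, []):
--             return available_skill
--         # remember only the FIRST qualifying substring match as a fallback
--         if fallback is None and (skill in available_skill or available_skill in skill) and len(available_skill) >= 3: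
--             fallback = available_skill
--     return fallback
-- ===== Notes on version B (the rewrite author's own statement) =====
-- stated objective: alternative
-- what changed: Replaces A's two sequential scans over the keys with a single loop that returns a synonym match immediately and records the first qualifying substring match as a fallback returned after the loop.
import Mathlib
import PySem

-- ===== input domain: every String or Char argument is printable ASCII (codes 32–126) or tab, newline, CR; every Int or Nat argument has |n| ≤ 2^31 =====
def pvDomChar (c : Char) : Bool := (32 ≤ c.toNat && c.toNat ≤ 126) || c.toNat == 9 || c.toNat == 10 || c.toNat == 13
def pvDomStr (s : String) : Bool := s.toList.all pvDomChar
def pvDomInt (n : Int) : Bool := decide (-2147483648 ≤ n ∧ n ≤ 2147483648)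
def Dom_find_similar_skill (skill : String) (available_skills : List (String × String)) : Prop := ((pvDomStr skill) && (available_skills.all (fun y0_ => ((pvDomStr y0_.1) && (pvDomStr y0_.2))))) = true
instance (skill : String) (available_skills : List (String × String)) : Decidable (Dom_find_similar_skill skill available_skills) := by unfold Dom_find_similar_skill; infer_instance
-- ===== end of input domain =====

-- One honest line: B folds A's two sequential key scans into a single pass that returns a
-- synonym match immediately and keeps the first qualifying substring match as a fallback.

-- shared constant: the skill_synonyms dict as a lookup with default []
def pvSyn (k : String) : List String :=
  if k = "data science" then ["data scientist", "data analytics", "data analysis"]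
  else if k = "data scientist" then ["data science", "data analytics", "data analysis"]
  else if k = "machine learning" then ["ml", "machine learning engineer", "ai engineer"]
  else if k = "artificial intelligence" then ["ai", "machine learning", "ai engineer"]
  else if k = "web development" then ["web developer", "frontend developer", "backend developer"]
  else if k = "full stack" then ["full stack developer", "fullstack developer", "web developer"]
  else if k = "react" then ["react developer", "react js", "reactjs"]
  else if k = "python" then ["python developer", "python programming"]
  else if k = "javascript" then ["js", "javascript developer", "js developer"]
  else []

-- ===== PORT A =====
-- first loop of A: return the first key related to `skill` by the synonym table
def fssScan1 (skill : String) : List (String × String) → Option String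
  | [] => none
  | (k, _) :: rest =>
    if (pvSyn k).contains skill then some k
    else if (pvSyn skill).contains k then some k
    else fssScan1 skill rest

-- second loop of A: return the first key in a substring relation with `skill` and of length ≥ 3
def fssScan2 (skill : String) : List (String × String) → Option String
  | [] => none
  | (k, _) :: rest =>
    if PySem.Str.isIn skill k || PySem.Str.isIn k skill then
      (if decide (3 ≤ PySem.Str.len k) then some k else fssScan2 skill rest)
    else fssScan2 skill rest

def find_similar_skill (skill : String) (available_skills : List (String × String)) : Option String :=
  match fssScan1 skill available_skills with
  | some k => some k
  | none => fssScan2 skill available_skills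

-- ===== PORT B =====
-- single pass with a fallback accumulator
def fssLoop (skill : String) (fb : Option String) : List (String × String) → Option String
  | [] => fb
  | (k, _) :: rest =>
    if (pvSyn k).contains skill || (pvSyn skill).contains k then some k
    else fssLoop skill
      (if fb.isNone && (PySem.Str.isIn skill k || PySem.Str.isIn k skill)
          && decide (3 ≤ PySem.Str.len k) then some k else fb) rest

def find_similar_skill_alt (skill : String) (available_skills : List (String × String)) : Option String :=
  fssLoop skill none available_skills

-- ===== PRECONDITION & SPEC =====
def Spec_find_similar_skill (skill : String) (available_skills : List (String × String)) (out : Option String) : Prop := out = find_similar_skill_alt skill available_skills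
instance (skill : String) (available_skills : List (String × String)) (out : Option String) : Decidable (Spec_find_similar_skill skill available_skills out) := by unfold Spec_find_similar_skill; infer_instance

-- ===== CLAIM (what is proved, stated in full; the proofs are below) =====
def Claim_equal_find_similar_skill : Prop := ∀ (skill : String) (available_skills : List (String × String)), Dom_find_similar_skill skill available_skills → Spec_find_similar_skill skill available_skills (find_similar_skill skill available_skills)

-- ===== LEMMAS AND PROOFS =====

-- B's single loop equals A's two scans, with the incoming fallback taking precedence over scan2
theorem fssLoop_eq (skill : String) (l : List (String × String)) (fb : Option String) :
    fssLoop skill fb l =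
      match fssScan1 skill l with
      | some k => some k
      | none => fb.or (fssScan2 skill l) := by
  induction l generalizing fb with
  | nil => cases fb <;> simp [fssLoop, fssScan1, fssScan2]
  | cons p rest ih =>
    obtain ⟨k, v⟩ := p
    simp only [fssLoop, fssScan1, fssScan2]
    cases (pvSyn k).contains skill with
    | true => simp
    | false =>
      cases (pvSyn skill).contains k with
      | true => simp
      | false =>
        simp only [Bool.or_self, Bool.false_eq_true, if_false]
        rw [ih]
        by_cases hsub : (PySem.Chars.isIn skill.toList k.toList = true ∨
            PySem.Chars.isIn k.toList skill.toList = true)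
        · by_cases hlen : 3 ≤ k.length
          · cases fb <;> cases fssScan1 skill rest <;> simp [hsub, hlen]
          · cases fb <;> cases fssScan1 skill rest <;> simp [hsub, hlen]
        · cases fb <;> cases fssScan1 skill rest <;> simp [hsub]

-- ===== VERDICT (by name: the statement is the Claim_ definition above) =====
theorem find_similar_skill_spec : Claim_equal_find_similar_skill := by
  intro skill l _
  unfold Spec_find_similar_skill find_similar_skill find_similar_skill_alt
  rw [fssLoop_eq]
  cases fssScan1 skill l <;> simp
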